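-- pv_equiv track=rewrite | github.com/ewing-operating-system/master-crm-web | scripts/sync_call_intel.py | group_calls_by_company
-- ===== SOURCE A (Python) =====
-- def group_calls_by_company(records: list[dict]) -> dict[str, list[dict]]:
--     """Group call records by contact_company name."""
--     groups: dict[str, list[dict]] = {}
--     for rec in records:
--         company = (rec.get("contact_company") or "").strip()
--         if not company:
--             continue
--         groups.setdefault(company, []).append(rec)
--     return groups
-- ===== SOURCE B (Python) =====
-- def group_calls_by_company(records: list[dict]) -> dict[str, list[dict]]:
--     """Group call records by contact_company name."""
--     keyed = []
--     for rec in records: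
--         k = (rec.get("contact_company") or "").strip()
--         if k:
--             keyed.append((k, rec))
--     keys = list(dict.fromkeys(k for k, _ in keyed))
--     return {k: [r for kk, r in keyed if kk == k] for k in keys}
-- ===== Notes on version B (the rewrite author's own statement) =====
-- stated objective: alternative
-- what changed: B replaces A's single pass that mutates a dict via setdefault/append with a three-stage pipeline: precompute (key, record) pairs filtering empty keys, dedupe the keys in first-occurrence order, then build each group by a per-key comprehension over the keyed list.
import Mathlib
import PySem

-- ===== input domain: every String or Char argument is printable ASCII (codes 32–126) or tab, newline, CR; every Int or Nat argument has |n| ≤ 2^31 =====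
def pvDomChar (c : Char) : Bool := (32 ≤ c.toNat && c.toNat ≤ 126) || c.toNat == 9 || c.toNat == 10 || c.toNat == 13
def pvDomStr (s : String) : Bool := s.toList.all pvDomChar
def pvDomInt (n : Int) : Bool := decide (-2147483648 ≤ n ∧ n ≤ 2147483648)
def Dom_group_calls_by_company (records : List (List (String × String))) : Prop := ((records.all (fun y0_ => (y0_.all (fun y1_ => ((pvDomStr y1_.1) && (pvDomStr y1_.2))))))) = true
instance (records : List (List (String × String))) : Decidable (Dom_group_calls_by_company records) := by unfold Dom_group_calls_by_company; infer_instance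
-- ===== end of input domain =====

-- B rebuilds the groups as a pipeline (filter keyed pairs, dedup keys, per-key scan) instead of A's single mutating-dict pass; objective: alternative.


-- ===== PORT A =====
-- (rec.get("contact_company") or "").strip(): lookup is first match; 'or ""' maps None to ""
-- (and a present "" to "", which getD+strip also yields), so '.getD ""' is exact here.
def pvCompanyKey (rec : List (String × String)) : String :=
  PySem.Str.strip ((rec.lookup "contact_company").getD "")

-- groups.setdefault(company, []).append(rec): extend the existing entry in place, else append a new entry at the end
def pvSetdefaultAppend (gs : List (String × List (List (String × String)))) (k : String)
    (rec : List (String × String)) : List (String × List (List (String × String))) :=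
  match gs with
  | [] => [(k, [rec])]
  | (k', v) :: rest =>
      if k' = k then (k', v ++ [rec]) :: rest else (k', v) :: pvSetdefaultAppend rest k rec

def group_calls_by_company (records : List (List (String × String))) : List (String × List (List (String × String))) :=
  records.foldl (fun gs rec =>
    let company := pvCompanyKey rec
    if company = "" then gs else pvSetdefaultAppend gs company rec) []

-- ===== PORT B =====
def group_calls_by_company_alt (records : List (List (String × String))) : List (String × List (List (String × String))) :=
  let keyed := records.filterMap (fun rec =>
    let k := pvCompanyKey rec
    if k = "" then none else some (k, rec))
  let keys := PySem.List.dedup (keyed.map (·.1))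
  keys.map (fun k => (k, (keyed.filter (fun p => p.1 = k)).map (·.2)))

-- ===== PRECONDITION & SPEC =====
def Spec_group_calls_by_company (records : List (List (String × String))) (out : List (String × List (List (String × String)))) : Prop := out = group_calls_by_company_alt records
instance (records : List (List (String × String))) (out : List (String × List (List (String × String)))) : Decidable (Spec_group_calls_by_company records out) := by unfold Spec_group_calls_by_company; infer_instance

-- ===== CLAIM (what is proved, stated in full; the proofs are below) =====
def Claim_equal_group_calls_by_company : Prop := ∀ (records : List (List (String × String))), Dom_group_calls_by_company records → Spec_group_calls_by_company records (group_calls_by_company records)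

-- ===== LEMMAS AND PROOFS =====

-- B's grouping pipeline applied to an explicit keyed list (B's body with ps in place of keyed)
def pvG (ps : List (String × List (String × String))) : List (String × List (List (String × String))) :=
  (PySem.List.dedup (ps.map (·.1))).map (fun k => (k, (ps.filter (fun p => p.1 = k)).map (·.2)))

lemma dedup_snoc {α : Type} [BEq α] [LawfulBEq α] (xs : List α) (x : α) :
    PySem.List.dedup (xs ++ [x]) = if x ∈ xs then PySem.List.dedup xs else PySem.List.dedup xs ++ [x] := by
  have h1 : PySem.List.dedup (xs ++ [x]) = PySem.Set.add (PySem.List.dedup xs) x :=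
    PySem.Set.ofList_append_singleton xs x
  rw [h1, PySem.Set.add_eq_ite]
  by_cases h : x ∈ xs
  all_goals simp [h]

lemma sda_mem (keys : List String) (g : String → List (List (String × String))) (k : String)
    (r : List (String × String)) (hnd : keys.Nodup) (hk : k ∈ keys) :
    pvSetdefaultAppend (keys.map (fun k' => (k', g k'))) k r
      = keys.map (fun k' => (k', g k' ++ if k' = k then [r] else [])) := by
  induction keys with
  | nil => cases hk
  | cons a rest ih =>
    simp only [List.map_cons, pvSetdefaultAppend]
    by_cases ha : a = k
    · subst ha
      rw [if_pos rfl, if_pos rfl]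
      congr 1
      apply List.map_congr_left
      intro k' hk'
      have : k' ≠ a := fun h => (List.nodup_cons.mp hnd).1 (h ▸ hk')
      simp [this]
    · rw [if_neg ha, ih (List.nodup_cons.mp hnd).2 (by cases hk with
        | head => exact absurd rfl ha
        | tail _ h => exact h)]
      simp [ha]

lemma sda_not_mem (keys : List String) (g : String → List (List (String × String))) (k : String)
    (r : List (String × String)) (hk : k ∉ keys) :
    pvSetdefaultAppend (keys.map (fun k' => (k', g k'))) k r
      = keys.map (fun k' => (k', g k')) ++ [(k, [r])] := by
  induction keys with
  | nil => rfl
  | cons a rest ih =>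
    have ha : a ≠ k := fun h => hk (h ▸ List.mem_cons_self)
    simp only [List.map_cons, pvSetdefaultAppend, if_neg ha, List.cons_append, List.cons.injEq,
      true_and]
    exact ih (fun h => hk (List.mem_cons_of_mem _ h))

lemma pvG_snoc (ps : List (String × List (String × String))) (k : String)
    (r : List (String × String)) :
    pvG (ps ++ [(k, r)]) = pvSetdefaultAppend (pvG ps) k r := by
  have hnd : (PySem.List.dedup (ps.map (·.1))).Nodup := PySem.List.nodup_dedup _
  simp only [pvG, List.map_append, List.map_cons, List.map_nil, dedup_snoc, List.filter_append]
  by_cases h : k ∈ ps.map (·.1)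
  · rw [if_pos h]
    have hk : k ∈ PySem.List.dedup (ps.map (·.1)) := (PySem.List.mem_dedup ..).mpr h
    rw [sda_mem _ _ _ _ hnd hk]
    apply List.map_congr_left
    intro k' _
    by_cases hkk : k = k' <;> simp [hkk, eq_comm]
  · rw [if_neg h]
    have hk : k ∉ PySem.List.dedup (ps.map (·.1)) := fun hc => h ((PySem.List.mem_dedup ..).mp hc)
    rw [sda_not_mem _ _ _ _ hk, List.map_append]
    congr 1
    · apply List.map_congr_left
      intro k' hk'
      have hne : k ≠ k' := fun he => hk (he ▸ hk')
      simp [hne]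
    · simp only [List.map_cons, List.map_nil, List.cons.injEq, Prod.mk.injEq, true_and, and_true]
      have : ps.filter (fun p => p.1 = k) = [] := by
        apply List.filter_eq_nil_iff.mpr
        intro p hp
        simp only [decide_eq_true_eq]
        exact fun he => h (he ▸ List.mem_map_of_mem hp)
      simp [this]

lemma loop_pvG (recs : List (List (String × String))) (ps : List (String × List (String × String))) :
    recs.foldl (fun gs rec =>
        let company := pvCompanyKey rec
        if company = "" then gs else pvSetdefaultAppend gs company rec) (pvG ps)
      = pvG (ps ++ recs.filterMap (fun rec =>
          let k := pvCompanyKey rec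
          if k = "" then none else some (k, rec))) := by
  induction recs generalizing ps with
  | nil => simp
  | cons r recs ih =>
    simp only [List.foldl_cons, List.filterMap_cons]
    by_cases h : pvCompanyKey r = ""
    · simpa [h] using ih ps
    · simp only [h, ite_false]
      rw [← pvG_snoc]
      simpa [List.append_assoc] using ih (ps ++ [(pvCompanyKey r, r)])

-- ===== VERDICT (by name: the statement is the Claim_ definition above) =====
theorem group_calls_by_company_spec : Claim_equal_group_calls_by_company := by
  intro records _
  show group_calls_by_company records = group_calls_by_company_alt records
  have h0 : pvG [] = [] := rfl
  calc group_calls_by_company records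
      = records.foldl (fun gs rec =>
          let company := pvCompanyKey rec
          if company = "" then gs else pvSetdefaultAppend gs company rec) (pvG []) := by
        rw [h0]; rfl
    _ = group_calls_by_company_alt records := by
        rw [loop_pvG]; rfl
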